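-- pv_equiv track=rewrite | github.com/lyn0719/programmers | level-0/120815_피자 나눠 먹기 (2).py | solution
-- ===== SOURCE A (Python) =====
-- def solution(n):
--     answer = 0
--     cnt = 6
--
--     if cnt % n == 0:
--         answer = 1
--     else:
--         while True:
--             cnt += 6
--             if cnt % n == 0:
--                 answer = cnt // 6
--                 break
--
--     return answer
-- ===== SOURCE B (Python) =====
-- def solution(n):
--     # pizzas needed so that n people get the same whole number of slices
--     # of 6-slice pizzas: |n| / gcd(6, |n|), with gcd(6, m) read off m's
--     # divisibility by 6, 3, 2 (no loop).
--     m = abs(n)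
--     if m % 6 == 0:
--         g = 6
--     elif m % 3 == 0:
--         g = 3
--     elif m % 2 == 0:
--         g = 2
--     else:
--         g = 1
--     return m // g
-- ===== Notes on version B (the rewrite author's own statement) =====
-- stated objective: faster
-- what changed: Replaced the trial loop over multiples of 6 by the closed form |n| // gcd(6,|n|), with gcd(6,|n|) read off divisibility of |n| by 6/3/2.
import Mathlib
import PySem

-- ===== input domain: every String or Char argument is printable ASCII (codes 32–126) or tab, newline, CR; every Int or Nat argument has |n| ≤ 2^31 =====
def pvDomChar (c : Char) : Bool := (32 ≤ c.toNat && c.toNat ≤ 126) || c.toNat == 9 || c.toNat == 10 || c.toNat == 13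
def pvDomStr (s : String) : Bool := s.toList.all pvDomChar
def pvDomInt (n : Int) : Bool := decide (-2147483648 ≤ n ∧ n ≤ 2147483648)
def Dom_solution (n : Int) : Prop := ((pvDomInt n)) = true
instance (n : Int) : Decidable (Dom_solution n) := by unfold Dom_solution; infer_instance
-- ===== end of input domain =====

-- B replaces A's trial loop over multiples of 6 by the closed form |n| // gcd(6,|n|) (objective: faster).


-- ===== PORT A =====
-- A's 'while True' loop; fuel n.natAbs suffices on Pre_ (n ≠ 0), proved below:
-- the loop stops at the first cnt = 6*k with cnt % n == 0, and k = |n|/gcd(6,|n|) ≤ |n|.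
def solutionLoop (n : Int) : Int → Nat → Int
  | _, 0 => 0
  | cnt, fuel+1 =>
    let cnt' := cnt + 6
    if PySem.Int.mod cnt' n = 0 then PySem.Int.floordiv cnt' 6
    else solutionLoop n cnt' fuel

def solution (n : Int) : Int :=
  if PySem.Int.mod 6 n = 0 then 1 else solutionLoop n 6 n.natAbs

-- ===== PORT B =====
def solution_alt (n : Int) : Int :=
  let m : Int := |n|
  let g : Int :=
    if PySem.Int.mod m 6 = 0 then 6
    else if PySem.Int.mod m 3 = 0 then 3
    else if PySem.Int.mod m 2 = 0 then 2
    else 1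
  PySem.Int.floordiv m g

-- ===== PRECONDITION & SPEC =====
-- Pre_ excludes n = 0, where A raises ZeroDivisionError (6 % 0).
def Pre_solution (n : Int) : Prop := n ≠ 0
instance (n : Int) : Decidable (Pre_solution n) := by unfold Pre_solution; infer_instance
def pvWitness_solution : Int := 5

def Spec_solution (n : Int) (out : Int) : Prop := out = solution_alt n
instance (n : Int) (out : Int) : Decidable (Spec_solution n out) := by unfold Spec_solution; infer_instance

-- ===== CLAIM (what is proved, stated in full; the proofs are below) =====
def Claim_equal_solution : Prop := ∀ (n : Int), Dom_solution n → Pre_solution n → Spec_solution n (solution n)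

-- ===== LEMMAS AND PROOFS =====

-- B's branch cascade computes gcd(6, m).
lemma g_eq (m : Nat) :
    (if m % 6 = 0 then (6:Nat) else if m % 3 = 0 then 3 else if m % 2 = 0 then 2 else 1)
      = Nat.gcd 6 m := by
  rw [Nat.gcd_rec]
  have h : m % 6 < 6 := Nat.mod_lt _ (by norm_num)
  have h3 : m % 3 = (m % 6) % 3 := by omega
  have h2 : m % 2 = (m % 6) % 2 := by omega
  interval_cases h6 : m % 6 <;> simp_all

-- B's value, as a natural number.
lemma alt_eq (n : Int) : solution_alt n = ((n.natAbs / Nat.gcd 6 n.natAbs : Nat) : Int) := by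
  show (PySem.Int.floordiv |n| _) = _
  rw [Int.abs_eq_natAbs,
      show ((6:Int) = ((6:Nat):Int)) from rfl, show ((3:Int) = ((3:Nat):Int)) from rfl,
      show ((2:Int) = ((2:Nat):Int)) from rfl, show ((1:Int) = ((1:Nat):Int)) from rfl]
  simp only [PySem.Int.mod_natCast, Nat.cast_eq_zero,
    ← apply_ite (fun k : Nat => (k : Int)), PySem.Int.floordiv_natCast, Nat.cast_inj]
  rw [g_eq]

-- least positive k with m ∣ 6k is m / gcd 6 m
lemma dvd_six_k0 (m : Nat) : m ∣ 6 * (m / Nat.gcd 6 m) := by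
  have hgm : Nat.gcd 6 m ∣ m := Nat.gcd_dvd_right 6 m
  have hg6 : Nat.gcd 6 m ∣ 6 := Nat.gcd_dvd_left 6 m
  have : m * (6 / Nat.gcd 6 m) = 6 * (m / Nat.gcd 6 m) := by
    rw [← Nat.mul_div_assoc m hg6, ← Nat.mul_div_assoc 6 hgm, Nat.mul_comm m 6]
  exact this ▸ dvd_mul_right m (6 / Nat.gcd 6 m)

lemma min_k0 (m : Nat) (_hm : 0 < m) (i : Nat) (hi : 0 < i) (hlt : i < m / Nat.gcd 6 m) :
    ¬ m ∣ 6 * i := by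
  intro hdvd
  set g := Nat.gcd 6 m with hgdef
  have hgpos : 0 < g := Nat.gcd_pos_of_pos_left m (by norm_num)
  have hgm : g ∣ m := Nat.gcd_dvd_right 6 m
  have hg6 : g ∣ 6 := Nat.gcd_dvd_left 6 m
  obtain ⟨t, ht⟩ := hdvd
  -- divide 6*i = m*t by g
  have key : (6 / g) * i = (m / g) * t := by
    apply Nat.eq_of_mul_eq_mul_left hgpos
    calc g * ((6 / g) * i) = (g * (6 / g)) * i := by ring
      _ = 6 * i := by rw [Nat.mul_div_cancel' hg6]
      _ = m * t := ht
      _ = (g * (m / g)) * t := by rw [Nat.mul_div_cancel' hgm]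
      _ = g * ((m / g) * t) := by ring
  have hco : Nat.Coprime (m / g) (6 / g) :=
    (Nat.coprime_div_gcd_div_gcd (m := 6) (n := m) hgpos).symm
  have hdvd_i : m / g ∣ i :=
    hco.dvd_of_dvd_mul_right (by rw [Nat.mul_comm, key]; exact Dvd.intro t rfl)
  have := Nat.le_of_dvd hi hdvd_i
  omega

lemma k0_pos (m : Nat) (hm : 0 < m) : 0 < m / Nat.gcd 6 m :=
  Nat.div_pos (Nat.le_of_dvd hm (Nat.gcd_dvd_right 6 m))
    (Nat.gcd_pos_of_pos_left m (by norm_num))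

lemma loop_eq (n : Int) (k0 : Nat)
    (hmin : ∀ i : Nat, 0 < i → i < k0 → ¬ (n ∣ 6 * (i:Int)))
    (hdvd : n ∣ 6 * (k0:Int)) :
    ∀ (fuel j : Nat), 0 < j → j < k0 → k0 ≤ j + fuel →
      solutionLoop n (6*(j:Int)) fuel = (k0:Int) := by
  intro fuel
  induction fuel with
  | zero => intro j _ h1 h2; omega
  | succ fuel ih =>
    intro j hj hjk hfuel
    show (if PySem.Int.mod (6*(j:Int)+6) n = 0 then PySem.Int.floordiv (6*(j:Int)+6) 6
          else solutionLoop n (6*(j:Int)+6) fuel) = (k0:Int)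
    have hc : (6*(j:Int)+6) = 6*((j+1:Nat):Int) := by push_cast; ring
    rw [hc]
    by_cases hd : n ∣ 6 * ((j+1:Nat):Int)
    · rw [if_pos ((PySem.Int.mod_eq_zero_iff_dvd _ _).mpr hd)]
      have hge : ¬ (j+1 < k0) := fun hlt => hmin (j+1) (by omega) hlt hd
      have hjk1 : j + 1 = k0 := by omega
      rw [show (6*((j+1:Nat):Int)) = ((6*(j+1):Nat):Int) by push_cast; ring,
          show ((6:Int) = ((6:Nat):Int)) from rfl, PySem.Int.floordiv_natCast]
      rw [← hjk1]
      norm_num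
    · rw [if_neg (fun h => hd ((PySem.Int.mod_eq_zero_iff_dvd _ _).mp h))]
      have hne : j + 1 ≠ k0 := fun h => hd (h ▸ hdvd)
      exact ih (j+1) (by omega) (by omega) (by omega)

-- n ∣ c  ↔  |n| ∣ c over ℕ for nonneg c of the form 6*i
lemma dvd_iff_natAbs (n : Int) (i : Nat) : (n ∣ 6 * (i:Int)) ↔ n.natAbs ∣ 6 * i := by
  rw [← Int.natAbs_dvd, show (6*(i:Int)) = ((6*i : Nat) : Int) by push_cast; ring,
      Int.natCast_dvd_natCast]

-- ===== VERDICT (by name: the statement is the Claim_ definition above) =====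
theorem solution_spec : Claim_equal_solution := by
  intro n _ hn
  unfold Spec_solution
  set m := n.natAbs with hm
  have hmpos : 0 < m := Int.natAbs_pos.mpr hn
  set k0 := m / Nat.gcd 6 m with hk0
  have halt : solution_alt n = (k0:Int) := alt_eq n
  have hdvd : n ∣ 6 * (k0:Int) := (dvd_iff_natAbs n k0).mpr (dvd_six_k0 m)
  have hmin : ∀ i : Nat, 0 < i → i < k0 → ¬ (n ∣ 6 * (i:Int)) := by
    intro i hi hlt h
    exact min_k0 m hmpos i hi hlt ((dvd_iff_natAbs n i).mp h)
  have hk0pos : 0 < k0 := k0_pos m hmpos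
  unfold solution
  by_cases h6 : n ∣ (6:Int)
  · rw [if_pos ((PySem.Int.mod_eq_zero_iff_dvd _ _).mpr h6)]
    have : ¬ (1 < k0) := by
      intro hlt
      exact hmin 1 one_pos hlt (by simpa using h6)
    have : k0 = 1 := by omega
    rw [halt, this]
    norm_num
  · rw [if_neg (fun h => h6 ((PySem.Int.mod_eq_zero_iff_dvd _ _).mp h))]
    have hk1 : 1 < k0 := by
      by_contra h
      have h1 : k0 = 1 := by omega
      apply h6
      simpa [h1] using hdvd
    have hfuel : k0 ≤ 1 + m := by
      have : k0 ≤ m := Nat.div_le_self _ _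
      omega
    have hl := loop_eq n k0 hmin hdvd m 1 one_pos hk1 hfuel
    rw [halt]
    simpa using hl
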